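-- pv_equiv track=rewrite | github.com/andivis/information-finder | program/other/domain_finder.py | wordsInARowTheSame
-- ===== SOURCE A (Python) =====
-- def wordsInARowTheSame(words, toCompare, joinString, mustStartWith):
--     result = 0
--
--     toCompare = toCompare.lower()
--
--     # try longest run first, then try smaller ones
--     for i in range(len(words), -1, -1):
--         line = joinString.join(words[0:i])
--
--         if mustStartWith:
--             if toCompare.startswith(line) and i > result:
--                 result = i
--                 break
--         else:
--             if line in toCompare and i > result:
--                 result = i
--                 break
--
--     return result
-- ===== SOURCE B (Python) =====
-- def wordsInARowTheSame(words, toCompare, joinString, mustStartWith):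
--     # Single forward pass: grow the joined line incrementally and stop at the
--     # first prefix length that no longer matches (matching is monotone: any
--     # prefix of a matching line also matches).
--     toCompare = toCompare.lower()
--     line = ''
--     run = 0
--     for i, w in enumerate(words):
--         line = w if i == 0 else line + joinString + w
--         if (toCompare.startswith(line) if mustStartWith else line in toCompare):
--             run = i + 1
--         else:
--             break
--     return run
-- ===== Notes on version B (the rewrite author's own statement) =====
-- stated objective: faster
-- what changed: A re-joins words[0:i] from scratch for every candidate length scanning from the top down; B makes one forward pass that extends the joined line incrementally and stops at the first prefix length that fails to match (matching is monotone in prefix length).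
import Mathlib
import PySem

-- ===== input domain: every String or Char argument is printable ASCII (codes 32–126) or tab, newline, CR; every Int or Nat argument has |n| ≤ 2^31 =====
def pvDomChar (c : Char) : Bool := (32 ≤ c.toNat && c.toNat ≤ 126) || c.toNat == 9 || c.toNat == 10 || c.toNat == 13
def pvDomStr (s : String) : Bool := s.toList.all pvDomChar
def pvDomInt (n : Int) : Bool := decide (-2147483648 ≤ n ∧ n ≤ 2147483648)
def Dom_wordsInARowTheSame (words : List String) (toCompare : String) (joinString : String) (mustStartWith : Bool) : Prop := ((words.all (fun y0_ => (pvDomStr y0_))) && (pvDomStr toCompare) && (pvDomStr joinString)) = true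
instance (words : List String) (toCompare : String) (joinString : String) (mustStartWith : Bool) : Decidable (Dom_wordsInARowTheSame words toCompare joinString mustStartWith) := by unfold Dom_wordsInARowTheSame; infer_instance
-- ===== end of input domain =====

-- B replaces A's quadratic top-down scan (re-joining words[0:i] for every i) by one
-- forward pass that grows the joined line incrementally and stops at the first
-- prefix length that no longer matches (matching is monotone in the prefix length).

-- ===== PORT A =====
-- the 'for i in range(len(words), -1, -1)' loop with its break (returning result = i)
def wirGoA (words : List String) (tc js : String) (msw : Bool) : List Int → Int → Int
  | [], result => result
  | i :: rest, result =>
      let line := PySem.Str.join js (PySem.List.slice words (some 0) (some i))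
      if msw then
        if PySem.Str.startswith tc line && decide (result < i) then i
        else wirGoA words tc js msw rest result
      else
        if PySem.Str.isIn line tc && decide (result < i) then i
        else wirGoA words tc js msw rest result

def wordsInARowTheSame (words : List String) (toCompare : String) (joinString : String) (mustStartWith : Bool) : Int :=
  let tc := PySem.Str.lower toCompare
  wirGoA words tc joinString mustStartWith
    (PySem.List.pyRange (PySem.List.len words) (-1) (-1)) 0

-- ===== PORT B =====
-- Source B's forward loop over enumerate(words); line is kept as List Char (PySem's
-- exact representation of a Python str being concatenated piece by piece)
def wirGoB (tc js : List Char) (msw : Bool) : List (Int × String) → List Char → Int → Int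
  | [], _, run => run
  | (i, w) :: rest, line, run =>
      let line' := if i == 0 then w.toList else line ++ js ++ w.toList
      if (if msw then PySem.Chars.startswith tc line' else PySem.Chars.isIn line' tc)
      then wirGoB tc js msw rest line' (i + 1)
      else run

def wordsInARowTheSame_alt (words : List String) (toCompare : String) (joinString : String) (mustStartWith : Bool) : Int :=
  let tc := (PySem.Str.lower toCompare).toList
  wirGoB tc joinString.toList mustStartWith (PySem.List.enumerate words 0) [] 0

-- ===== PRECONDITION & SPEC =====
def Spec_wordsInARowTheSame (words : List String) (toCompare : String) (joinString : String) (mustStartWith : Bool) (out : Int) : Prop := out = wordsInARowTheSame_alt words toCompare joinString mustStartWith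
instance (words : List String) (toCompare : String) (joinString : String) (mustStartWith : Bool) (out : Int) : Decidable (Spec_wordsInARowTheSame words toCompare joinString mustStartWith out) := by unfold Spec_wordsInARowTheSame; infer_instance

-- ===== CLAIM (what is proved, stated in full; the proofs are below) =====
def Claim_equal_wordsInARowTheSame : Prop := ∀ (words : List String) (toCompare : String) (joinString : String) (mustStartWith : Bool), Dom_wordsInARowTheSame words toCompare joinString mustStartWith → Spec_wordsInARowTheSame words toCompare joinString mustStartWith (wordsInARowTheSame words toCompare joinString mustStartWith)

-- ===== LEMMAS AND PROOFS =====

-- the matching test both programs apply to a candidate joined line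
def wirChk (msw : Bool) (tc line : List Char) : Bool :=
  if msw then PySem.Chars.startswith tc line else PySem.Chars.isIn line tc

-- the joined line made of the first i words
def wirLine (sep : List Char) (ws : List String) (i : Nat) : List Char :=
  PySem.Chars.join sep ((ws.take i).map String.toList)

-- A's scan, from the top index downward
def wirA (msw : Bool) (tc sep : List Char) (ws : List String) : Nat → Int
  | 0 => 0
  | i + 1 => if wirChk msw tc (wirLine sep ws (i + 1)) then ((i : Int) + 1) else wirA msw tc sep ws i

-- B's scan, upward from index k with fuel m
def wirB (msw : Bool) (tc sep : List Char) (ws : List String) : Nat → Nat → Int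
  | 0, k => (k : Int)
  | m + 1, k => if wirChk msw tc (wirLine sep ws (k + 1)) then wirB msw tc sep ws m (k + 1) else (k : Int)

theorem wirJoin_prefix (sep : List Char) (l t : List (List Char)) :
    PySem.Chars.join sep l <+: PySem.Chars.join sep (l ++ t) := by
  induction l with
  | nil => rw [PySem.Chars.join_nil]; exact List.nil_prefix
  | cons p l ih =>
      cases l with
      | nil =>
          cases t with
          | nil => exact List.prefix_refl _
          | cons q t =>
              rw [PySem.Chars.join_singleton, List.singleton_append, PySem.Chars.join_cons_cons,
                List.append_assoc]
              exact List.prefix_append _ _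
      | cons q l =>
          rw [List.cons_append, PySem.Chars.join_cons_cons, List.cons_append,
            PySem.Chars.join_cons_cons, List.append_assoc, List.append_assoc]
          exact (List.prefix_append_right_inj _).mpr ((List.prefix_append_right_inj _).mpr
            (by simpa using ih))

theorem wirJoin_append_singleton (sep : List Char) (l : List (List Char)) (x : List Char) (h : l ≠ []) :
    PySem.Chars.join sep (l ++ [x]) = PySem.Chars.join sep l ++ sep ++ x := by
  induction l with
  | nil => exact absurd rfl h
  | cons p l ih =>
      cases l with
      | nil => simp [PySem.Chars.join_cons_cons, PySem.Chars.join_singleton]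
      | cons q l =>
          have hih := ih (by simp)
          simp only [List.cons_append] at hih ⊢
          rw [PySem.Chars.join_cons_cons, hih, PySem.Chars.join_cons_cons]
          simp [List.append_assoc]

theorem wirChk_zero (msw : Bool) (tc sep : List Char) (ws : List String) :
    wirChk msw tc (wirLine sep ws 0) = true := by
  have h0 : wirLine sep ws 0 = [] := by simp [wirLine, PySem.Chars.join_nil]
  cases msw with
  | false => simp [wirChk, h0, PySem.Chars.isIn_nil]
  | true => simp [wirChk, h0, PySem.Chars.startswith_iff]

theorem wirChk_mono (msw : Bool) (tc sep : List Char) (ws : List String) (i : Nat)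
    (h : wirChk msw tc (wirLine sep ws (i + 1)) = true) :
    wirChk msw tc (wirLine sep ws i) = true := by
  have hpre : wirLine sep ws i <+: wirLine sep ws (i + 1) := by
    have hsplit : (ws.take (i + 1)).map String.toList
        = (ws.take i).map String.toList ++ (ws[i]?.toList).map String.toList := by
      rw [List.take_add_one, List.map_append]
    unfold wirLine
    rw [hsplit]
    exact wirJoin_prefix sep _ _
  cases msw with
  | true =>
      rw [wirChk, if_pos rfl] at h ⊢
      rw [PySem.Chars.startswith_iff] at h ⊢
      exact hpre.trans h
  | false =>
      rw [wirChk, if_neg (by simp)] at h ⊢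
      rw [PySem.Chars.isIn_iff_infix] at h ⊢
      exact hpre.isInfix.trans h

theorem wirChk_chain (msw : Bool) (tc sep : List Char) (ws : List String) (j t : Nat)
    (h : wirChk msw tc (wirLine sep ws (j + t)) = true) :
    wirChk msw tc (wirLine sep ws j) = true := by
  induction t generalizing j with
  | zero => exact h
  | succ t ih => exact ih _ (by rw [Nat.add_succ] at h; exact wirChk_mono msw tc sep ws (j + t) h)

theorem wirA_of_chk (msw : Bool) (tc sep : List Char) (ws : List String) (k : Nat)
    (h : wirChk msw tc (wirLine sep ws k) = true) :
    wirA msw tc sep ws k = (k : Int) := by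
  cases k with
  | zero => rfl
  | succ k => simp [wirA, h]

theorem wirA_stable (msw : Bool) (tc sep : List Char) (ws : List String) (k t : Nat)
    (hk : wirChk msw tc (wirLine sep ws k) = true)
    (hf : wirChk msw tc (wirLine sep ws (k + 1)) = false) :
    wirA msw tc sep ws (k + t) = (k : Int) := by
  induction t with
  | zero => exact wirA_of_chk msw tc sep ws k hk
  | succ t ih =>
      have hfalse : wirChk msw tc (wirLine sep ws (k + t + 1)) = false := by
        by_contra hc
        have := wirChk_chain msw tc sep ws (k + 1) t (by rw [show k + 1 + t = k + t + 1 by omega]; exact eq_true_of_ne_false hc)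
        rw [this] at hf; cases hf
      show wirA msw tc sep ws (k + t + 1) = (k : Int)
      simp [wirA, hfalse, ih]

theorem wirB_eq_wirA (msw : Bool) (tc sep : List Char) (ws : List String) (m k : Nat)
    (h : wirChk msw tc (wirLine sep ws k) = true) :
    wirB msw tc sep ws m k = wirA msw tc sep ws (k + m) := by
  induction m generalizing k with
  | zero => exact (wirA_of_chk msw tc sep ws k h).symm
  | succ m ih =>
      by_cases hc : wirChk msw tc (wirLine sep ws (k + 1)) = true
      · rw [show k + (m + 1) = (k + 1) + m by omega, ← ih (k + 1) hc]
        simp [wirB, hc]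
      · have hf : wirChk msw tc (wirLine sep ws (k + 1)) = false := by
          cases hx : wirChk msw tc (wirLine sep ws (k + 1)) with
          | true => exact absurd hx hc
          | false => rfl
        rw [show k + (m + 1) = k + (m + 1) by rfl]
        rw [wirA_stable msw tc sep ws k (m + 1) h hf]
        simp [wirB, hf]

theorem wirGoA_eq_wirA (ws : List String) (tcS js : String) (msw : Bool) (i : Nat) :
    wirGoA ws tcS js msw (PySem.List.pyRange (i : Int) (-1) (-1)) 0
      = wirA msw tcS.toList js.toList ws i := by
  induction i with
  | zero =>
      rw [PySem.List.pyRange_neg_one_cons (by norm_num),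
        PySem.List.pyRange_neg_one_eq_nil (by norm_num)]
      cases msw <;> simp [wirGoA, wirA]
  | succ i ih =>
      rw [PySem.List.pyRange_neg_one_cons (by omega)]
      have hsub : ((i + 1 : Nat) : Int) - 1 = (i : Int) := by push_cast; ring
      rw [hsub]
      have hline : (PySem.Str.join js (PySem.List.slice ws (some 0) (some ((i + 1 : Nat) : Int)))).toList
          = wirLine js.toList ws (i + 1) := by
        rw [PySem.List.slice_zero_start, PySem.List.slice_to_natCast,
          PySem.Str.toList_join, wirLine]
      have hpos : decide ((0 : Int) < ((i + 1 : Nat) : Int)) = true := by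
        simp
      cases msw with
      | true =>
          rw [wirGoA, if_pos rfl, PySem.Str.startswith_eq, hline]
          by_cases hc : PySem.Chars.startswith tcS.toList (wirLine js.toList ws (i + 1)) = true
          · rw [hc, hpos]
            simp [wirA, wirChk, hc]
          · rw [Bool.not_eq_true] at hc
            rw [hc]
            simp only [Bool.false_and, ih]
            simp [wirA, wirChk, hc]
      | false =>
          rw [wirGoA, if_neg (by simp), PySem.Str.isIn_eq, hline]
          by_cases hc : PySem.Chars.isIn (wirLine js.toList ws (i + 1)) tcS.toList = true
          · rw [hc, hpos]
            simp [wirA, wirChk, hc]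
          · rw [Bool.not_eq_true] at hc
            rw [hc]
            simp only [Bool.false_and, ih]
            simp [wirA, wirChk, hc]

theorem wirGoB_eq_wirB (ws : List String) (tc js : List Char) (msw : Bool) (k : Nat) (line : List Char)
    (hline : k = 0 ∨ line = wirLine js ws k) :
    wirGoB tc js msw (PySem.List.enumerate (ws.drop k) (k : Int)) line (k : Int)
      = wirB msw tc js ws (ws.length - k) k := by
  generalize hd : ws.drop k = d
  induction d generalizing k line with
  | nil =>
      have hlen : ws.length - k = 0 := by
        have := congrArg List.length hd
        simp [List.length_drop] at this
        omega
      rw [hlen]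
      simp [PySem.List.enumerate, wirGoB, wirB]
  | cons w rest ih =>
      have hk : k < ws.length := by
        by_contra hge
        rw [List.drop_eq_nil_of_le (by omega)] at hd
        simp at hd
      have hw : ws[k] = w := by
        have h0 : 0 < (ws.drop k).length := by rw [hd]; simp
        have := List.getElem_drop (xs := ws) (i := k) (j := 0) (h := h0)
        simp only [hd] at this
        simpa using this.symm
      have hdrop : ws.drop (k + 1) = rest := by
        rw [← List.drop_drop, hd]
        rfl
      have hline' : (if ((k : Int) == 0) then w.toList
          else line ++ js ++ w.toList) = wirLine js ws (k + 1) := by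
        rcases Nat.eq_zero_or_pos k with h0 | h0
        · subst h0
          simp only [List.drop_zero] at hd
          subst hd
          simp [wirLine, PySem.Chars.join_singleton]
        · have hne : ((k : Int) == 0) = false := by
            simp
            omega
          rw [hne, if_neg (by simp)]
          rcases hline with h | h
          · omega
          · rw [h, wirLine, wirLine, List.take_add_one, List.getElem?_eq_getElem hk, hw,
              List.map_append]
            rw [show (List.map String.toList (some w).toList : List (List Char)) = [w.toList] from rfl]
            rw [wirJoin_append_singleton js _ _ (by
              intro hnil
              rw [List.map_eq_nil_iff, List.take_eq_nil_iff] at hnil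
              rcases hnil with h1 | h1
              · omega
              · subst h1; simp at hk)]
      rw [PySem.List.enumerate_cons, wirGoB]
      simp only [hline']
      have hfuel : ws.length - k = (ws.length - (k + 1)) + 1 := by omega
      by_cases hc : wirChk msw tc (wirLine js ws (k + 1)) = true
      · have hcond : (if msw = true then PySem.Chars.startswith tc (wirLine js ws (k + 1))
            else PySem.Chars.isIn (wirLine js ws (k + 1)) tc) = true := by
          cases msw <;> simpa [wirChk] using hc
        rw [hcond, if_pos rfl]
        have := ih (k + 1) (wirLine js ws (k + 1)) (Or.inr rfl) hdrop
        rw [show ((k : Int) + 1) = ((k + 1 : Nat) : Int) by push_cast; ring, this, hfuel]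
        rw [wirB, if_pos hc]
      · have hcond : (if msw = true then PySem.Chars.startswith tc (wirLine js ws (k + 1))
            else PySem.Chars.isIn (wirLine js ws (k + 1)) tc) = false := by
          cases msw <;> simpa [wirChk] using hc
        rw [hcond, if_neg (by simp), hfuel, wirB, if_neg hc]

-- ===== VERDICT (by name: the statement is the Claim_ definition above) =====
theorem wordsInARowTheSame_spec : Claim_equal_wordsInARowTheSame := by
  intro ws toCompare js msw _
  unfold Spec_wordsInARowTheSame wordsInARowTheSame wordsInARowTheSame_alt
  have hA := wirGoA_eq_wirA ws (PySem.Str.lower toCompare) js msw ws.length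
  have hB := wirGoB_eq_wirB ws (PySem.Str.lower toCompare).toList js.toList msw 0 [] (Or.inl rfl)
  simp only [List.drop_zero, Nat.sub_zero, Nat.cast_zero] at hB
  rw [show PySem.List.len ws = (ws.length : Int) from rfl, hA, hB]
  rw [wirB_eq_wirA msw _ _ ws ws.length 0 (wirChk_zero msw _ _ ws)]
  simp
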